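-- pv_equiv track=rewrite | github.com/jonbakerfish/TweetScraper | export.py | splitTreeIndex
-- ===== SOURCE A (Python) =====
-- from collections import defaultdict
--
-- def splitTreeIndex(outs):
--     ids = [[ii['ID'] for ii in i] for i in outs]
--     idDict = defaultdict(list)
--     for index,i in enumerate(ids):
--         for ii in i:
--             idDict[ii].append(index)
--
--
--     tree = set([ii for i in list(idDict.values()) if len(i)!=1 for ii in i])
--     other = [i for i in range(len(outs)) if i not in tree]
--     return tree,other
-- ===== SOURCE B (Python) =====
-- def splitTreeIndex(outs):
--     # Flatten to a stream of (ID, group-index) pairs, then, for each distinct ID in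
--     # first-occurrence order, rescan the stream for that ID's group indices; an ID with
--     # more than one occurrence sends all those indices into tree.  No mapping structure.
--     pairs = [(d['ID'], index) for index, grp in enumerate(outs) for d in grp]
--     tree = set()
--     for key in dict.fromkeys(k for k, _ in pairs):
--         occ = [index for k, index in pairs if k == key]
--         if len(occ) > 1:
--             tree.update(occ)
--     other = [i for i in range(len(outs)) if i not in tree]
--     return tree, other
-- ===== Notes on version B (the rewrite author's own statement) =====
-- stated objective: alternative
-- what changed: B builds no ID->indices mapping at all: it flattens the input to a (ID, group-index) pair stream, iterates the distinct IDs in first-occurrence order and rescans the stream per ID to collect its group indices, adding them to tree when the ID occurs more than once; A instead accumulates an inverted defaultdict index in one pass and flattens its multi-entry value lists.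
import Mathlib
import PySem

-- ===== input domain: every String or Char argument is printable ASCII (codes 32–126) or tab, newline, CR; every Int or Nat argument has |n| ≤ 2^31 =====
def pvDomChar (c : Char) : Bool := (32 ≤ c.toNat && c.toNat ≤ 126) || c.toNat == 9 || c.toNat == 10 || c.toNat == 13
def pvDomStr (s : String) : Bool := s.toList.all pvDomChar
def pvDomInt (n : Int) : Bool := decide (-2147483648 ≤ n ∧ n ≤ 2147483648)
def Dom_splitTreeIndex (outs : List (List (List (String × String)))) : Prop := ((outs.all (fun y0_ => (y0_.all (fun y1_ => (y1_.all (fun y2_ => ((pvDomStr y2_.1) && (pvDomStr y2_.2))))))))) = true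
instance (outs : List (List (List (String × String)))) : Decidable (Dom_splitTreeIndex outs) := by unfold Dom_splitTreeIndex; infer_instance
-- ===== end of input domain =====

-- B builds no ID->indices mapping: it flattens to a (ID, group-index) pair stream and, per
-- distinct ID in first-occurrence order, rescans the stream for that ID's occurrences
-- (objective: alternative; same results, different algorithm, not faster).

-- shared helper: the lookup ii['ID'] (total here; Pre_ excludes inputs on which Python raises KeyError)
def pvGetID (d : List (String × String)) : String := ((PySem.Dict.mk d).get? "ID").getD ""

-- ===== PORT A =====
def splitTreeIndex (outs : List (List (List (String × String)))) : List Int × List Int :=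
  let ids : List (List String) := outs.map (fun i => i.map (fun ii => pvGetID ii))
  let idDict : PySem.Dict String (List Int) :=
    (PySem.List.enumerate ids).foldl
      (fun d p => p.2.foldl (fun d ii => d.modify ii [] (fun l => l ++ [p.1])) d)
      PySem.Dict.empty
  let tree : PySem.Set Int :=
    PySem.Set.ofList ((idDict.values.filter (fun i => i.length != 1)).flatten)
  let other : List Int :=
    (PySem.List.pyRange 0 (outs.length : Int)).filter (fun i => !(PySem.Set.contains tree i))
  (tree, other)

-- ===== PORT B =====
def splitTreeIndex_alt (outs : List (List (List (String × String)))) : List Int × List Int :=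
  let pairs : List (String × Int) :=
    (PySem.List.enumerate outs).flatMap (fun p => p.2.map (fun d => (pvGetID d, p.1)))
  let tree : PySem.Set Int :=
    (PySem.List.dedup (pairs.map Prod.fst)).foldl
      (fun s key =>
        let occ := (pairs.filter (fun q => q.1 == key)).map (fun q => q.2)
        if 1 < occ.length then PySem.Set.update s occ else s)
      PySem.Set.empty
  let other : List Int :=
    (PySem.List.pyRange 0 (outs.length : Int)).filter (fun i => !(PySem.Set.contains tree i))
  (tree, other)

-- ===== PRECONDITION & SPEC =====
-- Pre_ excludes exactly the inputs on which some inner dict lacks the key 'ID': there A raises KeyError.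
def Pre_splitTreeIndex (outs : List (List (List (String × String)))) : Prop :=
  (outs.all (fun grp => grp.all (fun d => (PySem.Dict.mk d).contains "ID"))) = true
instance (outs : List (List (List (String × String)))) : Decidable (Pre_splitTreeIndex outs) := by
  unfold Pre_splitTreeIndex; infer_instance

def pvWitness_splitTreeIndex : (List (List (List (String × String)))) :=
  [[[("ID", "a")], [("ID", "b")]], [[("ID", "a")]]]

def Spec_splitTreeIndex (outs : List (List (List (String × String)))) (out : List Int × List Int) : Prop := out = splitTreeIndex_alt outs
instance (outs : List (List (List (String × String)))) (out : List Int × List Int) : Decidable (Spec_splitTreeIndex outs out) := by unfold Spec_splitTreeIndex; infer_instance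

-- ===== CLAIM (what is proved, stated in full; the proofs are below) =====
def Claim_equal_splitTreeIndex : Prop := ∀ (outs : List (List (List (String × String)))), Dom_splitTreeIndex outs → Pre_splitTreeIndex outs → Spec_splitTreeIndex outs (splitTreeIndex outs)

-- ===== LEMMAS AND PROOFS =====

-- the flat (id, group-index) stream both ports traverse
def pvL (outs : List (List (List (String × String)))) : List (String × Int) :=
  (PySem.List.enumerate (outs.map (fun grp => grp.map pvGetID))).flatMap
    (fun p => p.2.map (fun ii => (ii, p.1)))

-- the id → group-indices accumulation A performs
def pvBuild (l : List (String × Int)) : PySem.Dict String (List Int) :=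
  l.foldl (fun d q => d.modify q.1 [] (fun w => w ++ [q.2])) PySem.Dict.empty

-- the common normal form of both tree streams: for each ID occurring more than once
-- (in first-occurrence order), the indices of its occurrences
def pvCanon (L : List (String × Int)) : List Int :=
  (((PySem.Set.ofList (L.map Prod.fst)).filter (fun k => decide (1 < (L.map Prod.fst).count k))).map
      (fun k => (L.filter (fun q => q.1 == k)).map (fun q => q.2))).flatten

lemma pv_foldl_nestedA (l : List (Int × List String)) (d : PySem.Dict String (List Int)) :
    l.foldl (fun d p => p.2.foldl (fun d ii => d.modify ii [] (fun w => w ++ [p.1])) d) d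
      = (l.flatMap (fun p => p.2.map (fun ii => (ii, p.1)))).foldl
          (fun d q => d.modify q.1 [] (fun w => w ++ [q.2])) d := by
  induction l generalizing d with
  | nil => rfl
  | cons p l ih => simp [List.flatMap_cons, List.foldl_append, ih, List.foldl_map]

lemma pv_enumerate_map {α β : Type} (f : α → β) (xs : List α) (s : Int) :
    PySem.List.enumerate (xs.map f) s = (PySem.List.enumerate xs s).map (fun p => (p.1, f p.2)) := by
  induction xs generalizing s with
  | nil => rfl
  | cons x xs ih => simp [PySem.List.enumerate_cons, ih]

lemma pv_flat_eq (outs : List (List (List (String × String)))) :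
    (PySem.List.enumerate outs).flatMap (fun p => p.2.map (fun d => (pvGetID d, p.1))) = pvL outs := by
  unfold pvL
  rw [pv_enumerate_map, List.flatMap_map]
  simp [List.map_map, Function.comp_def]

lemma pv_build_keys (l : List (String × Int)) :
    (pvBuild l).keys = PySem.Set.ofList (l.map Prod.fst) := by
  unfold pvBuild
  rw [PySem.Dict.keys_foldl_modify_key l Prod.fst [] (fun _ q => (fun w => w ++ [q.2]))]
  simp [PySem.Set.update_nil_left]

lemma pv_build_nodup (l : List (String × Int)) : (pvBuild l).keys.Nodup := by
  unfold pvBuild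
  exact PySem.Dict.nodup_keys_foldl_modify_key l Prod.fst [] (fun _ q => (fun w => w ++ [q.2])) _
    (by simp)

lemma pv_build_getD (l : List (String × Int)) (k : String) :
    (pvBuild l).getD k [] = (l.filter (fun q => q.1 == k)).map (fun q => q.2) := by
  unfold pvBuild
  rw [PySem.Dict.getD_foldl_modify_append l PySem.Dict.empty k]
  simp

lemma pv_build_values (l : List (String × Int)) :
    (pvBuild l).values
      = (PySem.Set.ofList (l.map Prod.fst)).map
          (fun k => (l.filter (fun q => q.1 == k)).map (fun q => q.2)) := by
  rw [PySem.Dict.values_eq_map_keys _ (pv_build_nodup l) [], pv_build_keys]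
  exact List.map_congr_left (fun k _ => pv_build_getD l k)

lemma pv_occ_length (L : List (String × Int)) (k : String) :
    ((L.filter (fun q => q.1 == k)).map (fun q => q.2)).length = (L.map Prod.fst).count k := by
  rw [List.length_map, ← List.countP_eq_length_filter, List.count_eq_countP, List.countP_map]
  rfl

-- A's tree stream in normal form
lemma pv_streamA (L : List (String × Int)) :
    (((pvBuild L).values.filter (fun v => v.length != 1)).flatten) = pvCanon L := by
  rw [pv_build_values, List.filter_map]
  unfold pvCanon
  congr 1
  congr 1
  apply List.filter_congr
  intro k hk
  have hmem : k ∈ L.map Prod.fst := (PySem.Set.mem_ofList _ _).mp hk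
  have hpos : 0 < (L.map Prod.fst).count k := List.count_pos_iff.mpr hmem
  simp only [Function.comp_apply]
  rw [pv_occ_length]
  rw [Bool.eq_iff_iff]
  simp only [bne_iff_ne, decide_eq_true_eq]
  omega

-- a guarded fold of Set.update equals one Set.update of the flattened selected blocks
lemma pv_foldl_update {α κ : Type} [BEq α] (p : κ → Prop) [DecidablePred p] (f : κ → List α)
    (K : List κ) (s : PySem.Set α) :
    K.foldl (fun s k => if p k then PySem.Set.update s (f k) else s) s
      = PySem.Set.update s (((K.filter (fun k => decide (p k))).map f).flatten) := by
  induction K generalizing s with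
  | nil => simp [PySem.Set.update]
  | cons k K ih =>
    by_cases h : p k
    · rw [List.foldl_cons, if_pos h, List.filter_cons_of_pos (by simpa using h), List.map_cons,
        List.flatten_cons, ih]
      simp [PySem.Set.update, List.foldl_append]
    · rw [List.foldl_cons, if_neg h, List.filter_cons_of_neg (by simpa using h), ih]

-- B's tree stream in normal form
lemma pv_streamB (L : List (String × Int)) :
    (PySem.List.dedup (L.map Prod.fst)).foldl
      (fun s key =>
        let occ := (L.filter (fun q => q.1 == key)).map (fun q => q.2)
        if 1 < occ.length then PySem.Set.update s occ else s)
      PySem.Set.empty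
      = PySem.Set.ofList (pvCanon L) := by
  simp only []
  rw [pv_foldl_update (fun key => 1 < ((L.filter (fun q => q.1 == key)).map (fun q => q.2)).length)
      (fun key => (L.filter (fun q => q.1 == key)).map (fun q => q.2))]
  unfold pvCanon
  have hded : PySem.List.dedup (L.map Prod.fst) = PySem.Set.ofList (L.map Prod.fst) := by
    simp
  rw [hded]
  have hfilter :
      (PySem.Set.ofList (L.map Prod.fst)).filter
          (fun key => decide (1 < ((L.filter (fun q => q.1 == key)).map (fun q => q.2)).length))
        = (PySem.Set.ofList (L.map Prod.fst)).filter
            (fun k => decide (1 < (L.map Prod.fst).count k)) := by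
    apply List.filter_congr
    intro k _
    rw [pv_occ_length]
  rw [hfilter]
  have : PySem.Set.update (PySem.Set.empty (α := Int))
      ((((PySem.Set.ofList (L.map Prod.fst)).filter (fun k => decide (1 < (L.map Prod.fst).count k))).map
          (fun k => (L.filter (fun q => q.1 == k)).map (fun q => q.2))).flatten)
      = PySem.Set.ofList
          ((((PySem.Set.ofList (L.map Prod.fst)).filter (fun k => decide (1 < (L.map Prod.fst).count k))).map
              (fun k => (L.filter (fun q => q.1 == k)).map (fun q => q.2))).flatten) := by
    simp [PySem.Set.update, PySem.Set.ofList_eq_foldl, PySem.Set.empty]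
  rw [this]

lemma pv_AB (outs : List (List (List (String × String)))) :
    splitTreeIndex outs = splitTreeIndex_alt outs := by
  simp only [splitTreeIndex, splitTreeIndex_alt]
  have hA : (PySem.List.enumerate (outs.map (fun i => i.map (fun ii => pvGetID ii)))).foldl
      (fun d p => p.2.foldl (fun d ii => d.modify ii [] (fun l => l ++ [p.1])) d) PySem.Dict.empty
      = pvBuild (pvL outs) := by
    rw [pv_foldl_nestedA]; rfl
  rw [hA, pv_streamA, pv_flat_eq, pv_streamB]

-- ===== VERDICT (by name: the statement is the Claim_ definition above) =====
theorem splitTreeIndex_spec : Claim_equal_splitTreeIndex := by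
  intro outs _ _
  unfold Spec_splitTreeIndex
  exact pv_AB outs
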